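-- pv_equiv track=rewrite | github.com/shaunhwq/Exposure-Correction-BMVC-2021 | test.py | adapt_size
-- ===== SOURCE A (Python) =====
-- def perform_test_size(h, size1, size2):
--     if size1 <= h < size2:
--         return size1
--     else:
--         return 0
--
-- def adapt_size(h, w):
--     nh = 0,
--     nw = 0
--     sizes = [64, 128, 192, 256, 320, 384, 448, 512, 576, 640, 704, 768, 832, 896, 960, 1024,
--              1088, 1152, 1216, 1280, 1344, 1408, 1472, 1536, 1600, 1664, 1728, 1792, 1856, 1920, 1984,
--              2048, 2112, 2176, 2240, 2304, 2368, 2432, 2496, 2560, 2624]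
--
--     for i in range(len(sizes) - 1):
--         nh = perform_test_size(h, sizes[i], sizes[i + 1])
--         if nh != 0:
--             break
--
--     for i in range(len(sizes) - 1):
--         nw = perform_test_size(w, sizes[i], sizes[i + 1])
--         if nw != 0:
--             break
--
--     return nw, nh
-- ===== SOURCE B (Python) =====
-- def adapt_size(h, w):
--     nh = 64 * int(h // 64) if 64 <= h < 2624 else 0
--     nw = 64 * int(w // 64) if 64 <= w < 2624 else 0
--     return nw, nh
-- ===== Notes on version B (the rewrite author's own statement) =====
-- stated objective: simpler
-- what changed: Replaces the 40-iteration bucket scan (with the perform_test_size helper) by a closed-form floor-to-multiple-of-64 computation per dimension, guarded by the half-open range [64, 2624).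
import Mathlib
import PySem

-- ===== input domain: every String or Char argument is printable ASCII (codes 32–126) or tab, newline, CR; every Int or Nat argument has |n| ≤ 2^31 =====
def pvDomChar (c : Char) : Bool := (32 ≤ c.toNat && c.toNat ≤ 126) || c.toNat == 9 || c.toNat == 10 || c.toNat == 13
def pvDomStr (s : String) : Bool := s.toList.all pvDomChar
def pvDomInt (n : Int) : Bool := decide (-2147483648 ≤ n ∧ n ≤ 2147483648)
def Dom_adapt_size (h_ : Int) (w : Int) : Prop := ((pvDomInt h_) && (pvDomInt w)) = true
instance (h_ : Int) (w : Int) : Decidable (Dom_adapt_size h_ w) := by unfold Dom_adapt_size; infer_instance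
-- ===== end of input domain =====

-- B replaces A's 40-iteration bucket scan by a closed-form floor-to-multiple-of-64 per
-- dimension (objective: simpler). Equivalence is proved on all integer inputs.

-- ===== PORT A =====
def perform_test_size (h size1 size2 : Int) : Int :=
  if size1 ≤ h ∧ h < size2 then size1 else 0

def pvSizes : List Int :=
  [64, 128, 192, 256, 320, 384, 448, 512, 576, 640, 704, 768, 832, 896, 960, 1024,
   1088, 1152, 1216, 1280, 1344, 1408, 1472, 1536, 1600, 1664, 1728, 1792, 1856, 1920, 1984,
   2048, 2112, 2176, 2240, 2304, 2368, 2432, 2496, 2560, 2624]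

-- the `for i in range(...)` loop with `break`: indices in range, so pyGet? is `some` (exact)
def pvLoopA (h : Int) : List Int → Int → Int
  | [], nh => nh
  | i :: rest, _ =>
    let nh := perform_test_size h ((PySem.List.pyGet? pvSizes i).getD 0)
                                  ((PySem.List.pyGet? pvSizes (i + 1)).getD 0)
    if nh ≠ 0 then nh else pvLoopA h rest nh

def adapt_size (h_ : Int) (w : Int) : Int × Int :=
  -- Python's initial `nh = 0,` (a tuple) is overwritten on the loop's first iteration,
  -- so the returned nh is always the loop's int; we initialise the accumulator with 0.
  let nh := pvLoopA h_ (PySem.List.pyRange 0 (41 - 1) 1) 0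
  let nw := pvLoopA w (PySem.List.pyRange 0 (41 - 1) 1) 0
  (nw, nh)

-- ===== PORT B =====
def pvBucket (x : Int) : Int :=
  if 64 ≤ x ∧ x < 2624 then 64 * PySem.Int.floordiv x 64 else 0

def adapt_size_alt (h_ : Int) (w : Int) : Int × Int :=
  let nh := pvBucket h_
  let nw := pvBucket w
  (nw, nh)

-- ===== PRECONDITION & SPEC =====
def Spec_adapt_size (h_ : Int) (w : Int) (out : Int × Int) : Prop := out = adapt_size_alt h_ w
instance (h_ : Int) (w : Int) (out : Int × Int) : Decidable (Spec_adapt_size h_ w out) := by unfold Spec_adapt_size; infer_instance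

-- ===== CLAIM (what is proved, stated in full; the proofs are below) =====
def Claim_equal_adapt_size : Prop := ∀ (h_ : Int) (w : Int), Dom_adapt_size h_ w → Spec_adapt_size h_ w (adapt_size h_ w)

-- ===== LEMMAS AND PROOFS =====

theorem pvSizes_get (k : Int) (h0 : 0 ≤ k) (hk : k ≤ 40) :
    (PySem.List.pyGet? pvSizes k).getD 0 = 64 * (k + 1) := by
  interval_cases k <;> decide

theorem pvLoop_tail (h : Int) : ∀ (n s : Nat), s + n = 39 → ∀ prev : Int,
    pvLoopA h ((List.range' s (n + 1)).map (fun j => Int.ofNat j)) prev =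
      if 64 * ((s : Int) + 1) ≤ h ∧ h < 2624 then 64 * (h / 64) else 0 := by
  intro n
  induction n with
  | zero =>
    intro s hs prev
    have hs39 : s = 39 := by omega
    subst hs39
    have hl : (List.range' 39 (0 + 1)).map (fun j => Int.ofNat j) = [(39 : Int)] := rfl
    rw [hl]
    simp only [pvLoopA]
    rw [pvSizes_get _ (by omega) (by omega), pvSizes_get _ (by omega) (by omega)]
    simp only [perform_test_size]
    split_ifs <;> omega
  | succ n ih =>
    intro s hs prev
    rw [List.range'_succ]
    simp only [List.map_cons, pvLoopA]
    rw [pvSizes_get _ (by simp only [Int.ofNat_eq_natCast]; omega) (by simp only [Int.ofNat_eq_natCast]; omega),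
        pvSizes_get _ (by simp only [Int.ofNat_eq_natCast]; omega) (by simp only [Int.ofNat_eq_natCast]; omega)]
    simp only [perform_test_size]
    rw [ih (s + 1) (by omega)]
    push_cast [Int.ofNat_eq_natCast]
    split_ifs <;> omega

theorem pvLoop_eq_bucket (h : Int) :
    pvLoopA h (PySem.List.pyRange 0 (41 - 1) 1) 0 = pvBucket h := by
  have hr : PySem.List.pyRange 0 (41 - 1) 1 =
      (List.range' 0 40).map (fun j => Int.ofNat j) := by decide
  have hfd : PySem.Int.floordiv h 64 = h / 64 := PySem.Int.floordiv_eq_ediv_of_pos (by omega)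
  rw [hr, pvLoop_tail h 39 0 (by omega) 0]
  simp only [pvBucket, hfd]
  norm_num

-- ===== VERDICT (by name: the statement is the Claim_ definition above) =====
theorem adapt_size_spec : Claim_equal_adapt_size := by
  intro h_ w _
  show adapt_size h_ w = adapt_size_alt h_ w
  simp only [adapt_size, adapt_size_alt, pvLoop_eq_bucket]
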